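-- pv_equiv track=rewrite | github.com/apple/coremltools | coremltools/converters/mil/mil/ops/defs/_utils.py | parse_einsum_equation
-- ===== SOURCE A (Python) =====
-- from typing import List, Tuple
--
-- def parse_einsum_equation(equation: str) -> Tuple[List[str]]:
--     """
--     Args
--         equation : str
--
--      parse the equation in the following manner:
--      (running example: "nchw,nwhr->nchr")
--
--     step 1: split the equation with delimiter "->"
--         e.g.: this will give "nchw,nwhr" and "nchr"
--
--     step 2: split the LHS equation string with delimiter ","
--         e.g.: this will give input1 : "nchw", input2: "nwhr"
--
--     step 3: map each character to a unique integer, which is incremented.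
--             Iterate over input1, input2 and output, in that order.
--             e.g.: input 1, i.e., "nchw" will give vector {0,1,2,3}
--                   input 2, i.e, "nwhr" will produce {0,3,2,4}
--                   output , i.e. "nchr" will produce {0,1,2,4}
--
--     return vectors corresponding to the 2 inputs and the output
--     """
--     input_output_str = equation.split('->')
--     assert len(input_output_str) == 2, "unsupported einsum equation {}".format(equation)
--     input_str = input_output_str[0]
--     output_str = input_output_str[1]
--
--     inputs = input_str.split(',')
--
--     in_outs = inputs + [output_str]
--     map_char_to_int = {}
--
--     def _update_vec(str, map_char_to_int, index):
--         vec = []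
--         for i, s in enumerate(str):
--             if s not in map_char_to_int:
--                 map_char_to_int[s] = index
--                 index += 1
--             vec.append(map_char_to_int[s])
--         return index, vec
--
--     index = 0
--     in_outs_vec = []
--     for inout_str in in_outs:
--         index, vec = _update_vec(inout_str, map_char_to_int, index)
--         in_outs_vec.append(vec)
--
--     return tuple(in_outs_vec)
-- ===== SOURCE B (Python) =====
-- def parse_einsum_equation(equation):
--     # Closed-form rank: join all terms; a character's integer is the number of
--     # distinct characters occurring strictly before its first occurrence in the
--     # joined string. No dict, no counter, no incrementally built table.
--     parts = equation.split('->')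
--     assert len(parts) == 2, "unsupported einsum equation {}".format(equation)
--     in_outs = parts[0].split(',') + [parts[1]]
--     joined = ''.join(in_outs)
--     return tuple([len(set(joined[:joined.index(c)])) for c in s] for s in in_outs)
-- ===== Notes on version B (the rewrite author's own statement) =====
-- stated objective: alternative
-- what changed: Replaces A's incrementally built char->int table threaded through the loops with a closed-form per-character rank: join all terms once and map each character to the number of distinct characters before its first occurrence in the joined string; no mapping table is ever built.
import Mathlib
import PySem

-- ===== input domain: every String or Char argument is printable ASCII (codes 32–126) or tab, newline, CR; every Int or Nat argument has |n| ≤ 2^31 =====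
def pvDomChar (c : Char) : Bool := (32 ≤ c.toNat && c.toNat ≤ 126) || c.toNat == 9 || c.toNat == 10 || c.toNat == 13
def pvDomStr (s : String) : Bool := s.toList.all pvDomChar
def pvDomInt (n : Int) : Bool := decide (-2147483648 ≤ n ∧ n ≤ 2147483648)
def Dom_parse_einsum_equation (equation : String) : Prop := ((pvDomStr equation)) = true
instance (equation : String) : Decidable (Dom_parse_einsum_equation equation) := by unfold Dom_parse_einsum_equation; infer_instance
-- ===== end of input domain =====

-- B replaces A's threaded dict+counter table with a closed-form per-character rank over the joined string (alternative decomposition; the assert case is excluded by Pre_).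

-- ===== PORT A =====
-- one step of _update_vec's loop body: state is (map_char_to_int, index, vec)
def pvAStep (st : PySem.Dict Char Int × Int × List Int) (c : Char) :
    PySem.Dict Char Int × Int × List Int :=
  if st.1.contains c then
    (st.1, st.2.1, st.2.2 ++ [(st.1.get? c).getD 0])
  else
    (st.1.insert c st.2.1, st.2.1 + 1, st.2.2 ++ [((st.1.insert c st.2.1).get? c).getD 0])

-- _update_vec(str, map_char_to_int, index): the dict is mutated in place, so it is threaded
def pvUpdVec (s : String) (m : PySem.Dict Char Int) (idx : Int) :
    PySem.Dict Char Int × Int × List Int :=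
  s.toList.foldl pvAStep (m, idx, [])

-- body of 'for inout_str in in_outs'
def pvOuterStep (st : PySem.Dict Char Int × Int × List (List Int)) (s : String) :
    PySem.Dict Char Int × Int × List (List Int) :=
  let r := pvUpdVec s st.1 st.2.1
  (r.1, r.2.1, st.2.2 ++ [r.2.2])

def parse_einsum_equation (equation : String) : List (List Int) :=
  let input_output_str := (PySem.Str.split? equation "->").getD []
  if input_output_str.length = 2 then
    let input_str := input_output_str.getD 0 ""
    let output_str := input_output_str.getD 1 ""
    let inputs := (PySem.Str.split? input_str ",").getD []
    let in_outs := inputs ++ [output_str]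
    (in_outs.foldl pvOuterStep (PySem.Dict.empty, 0, [])).2.2
  else []   -- assert fails (AssertionError); excluded by Pre_

-- ===== PORT B =====
def parse_einsum_equation_alt (equation : String) : List (List Int) :=
  let parts := (PySem.Str.split? equation "->").getD []
  if parts.length = 2 then
    let in_outs := (PySem.Str.split? (parts.getD 0 "") ",").getD [] ++ [parts.getD 1 ""]
    -- ''.join(in_outs) as a char list; joined.index(c) never fails (every c is in joined), so getD 0 is exact
    let joined := (in_outs.map String.toList).flatten
    in_outs.map (fun s => s.toList.map (fun c =>
      ((PySem.Set.ofList (joined.take ((PySem.List.index? joined c).getD 0))).length : Int)))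
  else []   -- assert fails (AssertionError); excluded by Pre_

-- ===== PRECONDITION & SPEC =====
-- Pre_ excludes exactly the equations whose split on the arrow delimiter does not have 2 parts: there A's assert raises AssertionError.
def Pre_parse_einsum_equation (equation : String) : Prop :=
  ((PySem.Str.split? equation "->").getD []).length = 2
instance (equation : String) : Decidable (Pre_parse_einsum_equation equation) := by
  unfold Pre_parse_einsum_equation; infer_instance
def pvWitness_parse_einsum_equation : String := "nchw,nwhr->nchr"

def Spec_parse_einsum_equation (equation : String) (out : List (List Int)) : Prop := out = parse_einsum_equation_alt equation
instance (equation : String) (out : List (List Int)) : Decidable (Spec_parse_einsum_equation equation out) := by unfold Spec_parse_einsum_equation; infer_instance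

-- ===== CLAIM (what is proved, stated in full; the proofs are below) =====
def Claim_equal_parse_einsum_equation : Prop := ∀ (equation : String), Dom_parse_einsum_equation equation → Pre_parse_einsum_equation equation → Spec_parse_einsum_equation equation (parse_einsum_equation equation)

-- ===== LEMMAS AND PROOFS =====

-- invariant relating A's dict to the first-occurrence order list o: the dict maps each char to its position in o
def pvRel (m : PySem.Dict Char Int) (o : List Char) : Prop :=
  ∀ c, m.get? c = (PySem.List.index? o c).map (fun n => (n : Int))

theorem pvRel_empty : pvRel PySem.Dict.empty [] := by
  intro c
  simp [PySem.Dict.get?_empty, PySem.List.index?_eq_idxOf?]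

theorem pv_prefix_update (o : List Char) (cs : List Char) :
    o <+: PySem.Set.update o cs := by
  rw [PySem.Set.update_eq_append_filter]
  exact List.prefix_append _ _

theorem pv_index?_stable {o O : List Char} {c : Char} (h : o <+: O) (hc : c ∈ o) :
    PySem.List.index? O c = PySem.List.index? o c := by
  obtain ⟨t, rfl⟩ := h
  exact PySem.List.index?_append_of_mem t hc

theorem pv_contains_of_rel {m : PySem.Dict Char Int} {o : List Char} (h : pvRel m o) (c : Char) :
    m.contains c = decide (c ∈ o) := by
  rw [PySem.Dict.contains_eq_isSome_get?, h c]
  rcases hmem : decide (c ∈ o) with _ | _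
  · have : c ∉ o := of_decide_eq_false hmem
    rw [(PySem.List.index?_eq_none_iff _ _).mpr this]; rfl
  · have : c ∈ o := of_decide_eq_true hmem
    have := (PySem.List.index?_isSome_iff _ _).mpr this
    rcases hk : PySem.List.index? o c with _ | k
    · rw [hk] at this; simp at this
    · rfl

theorem pv_mem_update_right {o : List Char} {cs : List Char} {c : Char} (hc : c ∈ cs) :
    c ∈ PySem.Set.update o cs := by
  rw [PySem.Set.update_eq_append_filter]
  by_cases ho : c ∈ o
  · exact List.mem_append_left _ ho
  · refine List.mem_append_right _ ?_
    refine List.mem_filter.mpr ⟨(PySem.Set.mem_ofList _ _).mpr hc, ?_⟩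
    simp [PySem.Set.contains_eq_listContains]
    exact fun h => absurd (by simpa using h) ho

-- one A-step, described through the order list
theorem pvAStep_eq {m : PySem.Dict Char Int} {o : List Char} (vec : List Int) (c : Char)
    (h : pvRel m o) :
    ∃ m', pvAStep (m, ((o.length : Int)), vec) c
        = (m', (((PySem.Set.add o c).length : Int)),
           vec ++ [((PySem.List.index? (PySem.Set.add o c) c).getD 0 : Int)])
      ∧ pvRel m' (PySem.Set.add o c) := by
  by_cases hc : c ∈ o
  · refine ⟨m, ?_, ?_⟩
    · have hadd : PySem.Set.add o c = o := by
        simp [PySem.Set.add, PySem.Set.contains_eq_listContains, hc]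
      simp only [pvAStep, pv_contains_of_rel h c, hc, decide_true, if_true, hadd, h c]
      rcases hk : PySem.List.index? o c with _ | k
      · exact absurd hc ((PySem.List.index?_eq_none_iff o c).mp hk)
      · rfl
    · have hadd : PySem.Set.add o c = o := by
        simp [PySem.Set.add, PySem.Set.contains_eq_listContains, hc]
      rw [hadd]; exact h
  · have hadd : PySem.Set.add o c = o ++ [c] := by
      simp [PySem.Set.add, PySem.Set.contains_eq_listContains, hc]
    have hidx : PySem.List.index? (o ++ [c]) c = some o.length :=
      PySem.List.index?_append_singleton_self o c hc
    refine ⟨m.insert c (o.length : Int), ?_, ?_⟩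
    · simp only [pvAStep, pv_contains_of_rel h c, hc, decide_false, hadd,
        PySem.Dict.get?_insert_self, hidx]
      simp
    · intro c'
      rw [hadd]
      by_cases hcc : c' = c
      · subst hcc
        rw [PySem.Dict.get?_insert_self, hidx]; rfl
      · rw [PySem.Dict.get?_insert_of_ne m _ hcc, h c']
        by_cases hco : c' ∈ o
        · rw [PySem.List.index?_append_of_mem _ hco]
        · rw [(PySem.List.index?_eq_none_iff _ _).mpr hco,
            (PySem.List.index?_eq_none_iff _ _).mpr (by simp [hco, hcc])]

-- the char loop of _update_vec, described through the order after this string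
theorem pvFold_chars : ∀ (cs : List Char) (m : PySem.Dict Char Int) (o : List Char)
    (vec : List Int), pvRel m o →
    ∃ m', cs.foldl pvAStep (m, ((o.length : Int)), vec)
        = (m', (((PySem.Set.update o cs).length : Int)),
           vec ++ cs.map (fun c => ((PySem.List.index? (PySem.Set.update o cs) c).getD 0 : Int)))
      ∧ pvRel m' (PySem.Set.update o cs) := by
  intro cs
  induction cs with
  | nil =>
      intro m o vec h
      exact ⟨m, by simp [PySem.Set.update], by simpa [PySem.Set.update] using h⟩
  | cons c cs ih =>
      intro m o vec h
      obtain ⟨m₁, hstep, hrel₁⟩ := pvAStep_eq vec c h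
      obtain ⟨m', hfold, hrel'⟩ := ih m₁ (PySem.Set.add o c)
        (vec ++ [((PySem.List.index? (PySem.Set.add o c) c).getD 0 : Int)]) hrel₁
      have hupd : PySem.Set.update o (c :: cs) = PySem.Set.update (PySem.Set.add o c) cs := rfl
      refine ⟨m', ?_, by rw [hupd]; exact hrel'⟩
      rw [List.foldl_cons, hstep, hfold, hupd]
      have hmemadd : c ∈ PySem.Set.add o c := (PySem.Set.mem_add o c c).mpr (Or.inr rfl)
      have hstab : PySem.List.index? (PySem.Set.update (PySem.Set.add o c) cs) c
          = PySem.List.index? (PySem.Set.add o c) c :=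
        pv_index?_stable (pv_prefix_update _ _) hmemadd
      simp only [List.map_cons, hstab, List.append_assoc, List.singleton_append]

theorem pv_prefix_fold (ss : List String) : ∀ (o : List Char),
    o <+: ss.foldl (fun o' s' => PySem.Set.update o' s'.toList) o := by
  induction ss with
  | nil => intro o; exact List.prefix_refl o
  | cons s ss ih =>
      intro o
      exact (pv_prefix_update o s.toList).trans (ih (PySem.Set.update o s.toList))

-- the outer loop of A, described through the full first-occurrence order
theorem pvFold_strs : ∀ (ss : List String) (m : PySem.Dict Char Int) (o : List Char)
    (acc : List (List Int)), pvRel m o →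
    (ss.foldl pvOuterStep (m, ((o.length : Int)), acc)).2.2
      = acc ++ ss.map (fun s => s.toList.map (fun c =>
          ((PySem.List.index? (ss.foldl (fun o' s' => PySem.Set.update o' s'.toList) o) c).getD 0 : Int))) := by
  intro ss
  induction ss with
  | nil => intro m o acc _; simp
  | cons s ss ih =>
      intro m o acc h
      obtain ⟨m₁, hfold, hrel₁⟩ := pvFold_chars s.toList m o [] h
      have hstep : pvOuterStep (m, ((o.length : Int)), acc) s
          = (m₁, (((PySem.Set.update o s.toList).length : Int)),
             acc ++ [s.toList.map (fun c =>
               ((PySem.List.index? (PySem.Set.update o s.toList) c).getD 0 : Int))]) := by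
        simp only [pvOuterStep, pvUpdVec, hfold, List.nil_append]
      rw [List.foldl_cons, hstep, ih m₁ (PySem.Set.update o s.toList) _ hrel₁]
      have hO : (s :: ss).foldl (fun o' s' => PySem.Set.update o' s'.toList) o
          = ss.foldl (fun o' s' => PySem.Set.update o' s'.toList) (PySem.Set.update o s.toList) := rfl
      rw [hO]
      have hmap : s.toList.map (fun c =>
            ((PySem.List.index? (PySem.Set.update o s.toList) c).getD 0 : Int))
          = s.toList.map (fun c =>
            ((PySem.List.index? (ss.foldl (fun o' s' => PySem.Set.update o' s'.toList)
                (PySem.Set.update o s.toList)) c).getD 0 : Int)) := by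
        refine List.map_congr_left ?_
        intro c hc
        rw [pv_index?_stable (pv_prefix_fold ss _) (pv_mem_update_right hc)]
      rw [hmap]
      simp

-- ========== bridge between the order list and B's closed-form rank ==========

theorem pv_update_append (o : List Char) (xs ys : List Char) :
    PySem.Set.update o (xs ++ ys) = PySem.Set.update (PySem.Set.update o xs) ys := by
  simp [PySem.Set.update, List.foldl_append]

-- the fold of Set.update over the string list is set() of the joined char list
theorem pv_fold_eq_ofList (ss : List String) : ∀ (o : List Char),
    ss.foldl (fun o' s' => PySem.Set.update o' s'.toList) o
      = PySem.Set.update o ((ss.map String.toList).flatten) := by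
  induction ss with
  | nil => intro o; simp [PySem.Set.update]
  | cons s ss ih =>
      intro o
      simp only [List.foldl_cons, List.map_cons, List.flatten_cons, pv_update_append]
      exact ih (PySem.Set.update o s.toList)

-- closed-form rank: position in the dedup list = #distinct chars before the first occurrence
theorem pv_rank_closed_form (T : List Char) (c : Char) (hc : c ∈ T) :
    PySem.List.index? (PySem.Set.update [] T) c
      = some (PySem.Set.ofList (T.take ((PySem.List.index? T c).getD 0))).length := by
  have hsome := (PySem.List.index?_isSome_iff T c).mpr hc
  rcases hk : PySem.List.index? T c with _ | k
  · rw [hk] at hsome; simp at hsome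
  obtain ⟨pre, suf, hT, hlen, hpre⟩ := (PySem.List.index?_eq_some_iff T c k).mp hk
  have htake : T.take k = pre := by
    rw [hT, ← hlen, List.take_left]
  have hofpre : c ∉ PySem.Set.ofList pre := fun h =>
    hpre ((PySem.Set.mem_ofList pre c).mp h)
  -- update [] T = update (ofList pre ++ [c]) suf
  have hupd : PySem.Set.update ([] : List Char) T
      = PySem.Set.update (PySem.Set.ofList pre ++ [c]) suf := by
    rw [hT]
    have h1 : PySem.Set.update ([] : List Char) (pre ++ c :: suf)
        = PySem.Set.update (PySem.Set.update [] pre) (c :: suf) := pv_update_append _ _ _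
    have h2 : PySem.Set.update ([] : List Char) pre = PySem.Set.ofList pre := by
      simp [PySem.Set.ofList_eq_foldl, PySem.Set.update]
    have h3 : PySem.Set.add (PySem.Set.ofList pre) c = PySem.Set.ofList pre ++ [c] := by
      simp [PySem.Set.add, PySem.Set.contains_eq_listContains, hofpre]
    rw [h1, h2]
    show PySem.Set.update (PySem.Set.add (PySem.Set.ofList pre) c) suf = _
    rw [h3]
  rw [hupd,
    pv_index?_stable (pv_prefix_update _ _)
      (List.mem_append_right _ (List.mem_singleton.mpr rfl)),
    PySem.List.index?_append_singleton_self _ _ hofpre]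
  simp [htake]

-- ===== VERDICT (by name: the statement is the Claim_ definition above) =====
set_option maxHeartbeats 1000000 in
theorem parse_einsum_equation_spec : Claim_equal_parse_einsum_equation := by
  intro equation _ hpre
  unfold Spec_parse_einsum_equation parse_einsum_equation parse_einsum_equation_alt
  unfold Pre_parse_einsum_equation at hpre
  simp only [hpre, if_pos]
  set ss := (PySem.Str.split? (((PySem.Str.split? equation "->").getD []).getD 0 "") ",").getD []
      ++ [((PySem.Str.split? equation "->").getD []).getD 1 ""] with hss
  have hA := pvFold_strs ss PySem.Dict.empty [] [] pvRel_empty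
  simp only [List.length_nil, Nat.cast_zero] at hA
  rw [hA]
  simp only [List.nil_append]
  refine List.map_congr_left ?_
  intro s hs
  refine List.map_congr_left ?_
  intro c hc
  have hcT : c ∈ (ss.map String.toList).flatten :=
    List.mem_flatten.mpr ⟨s.toList, List.mem_map.mpr ⟨s, hs, rfl⟩, hc⟩
  rw [pv_fold_eq_ofList ss [], pv_rank_closed_form _ c hcT, Option.getD_some]
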